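-- pv_equiv track=rewrite | github.com/nju-websoft/DUNKS | code/unified-data-chunking/pdf_scripts/scripts/clean_text.py | linking_conjunctions
-- ===== SOURCE A (Python) =====
-- from functools import reduce
--
-- def linking_conjunctions(text):
--     """"
--     join lines if conjunction links them
--
--     @var text [list], text scrapped from pdf
--
--     @returns [list], cleaned text
--     """
--     conjunctions = ('of','for','from','and',',')
--     i, n = 0, len(text)
--     while i + 1 < n :
--         if text[i].endswith(conjunctions):
--             text[i:i+2] = [reduce(lambda i, j: i + ' ' + j, text[i:i+2])]
--             i , n = i - 1 , n - 1
--         i = i + 1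
--     return text
-- ===== SOURCE B (Python) =====
-- def linking_conjunctions(text):
--     """Single-pass grouping: accumulate a run of lines ending in a conjunction, flush on the first line that doesn't; mutates text in place like A."""
--     conjunctions = ('of', 'for', 'from', 'and', ',')
--     result = []
--     group = []
--     for line in text:
--         group.append(line)
--         if not line.endswith(conjunctions):
--             result.append(' '.join(group))
--             group = []
--     if group:
--         result.append(' '.join(group))
--     text[:] = result
--     return text
-- ===== Notes on version B (the rewrite author's own statement) =====
-- stated objective: simpler
-- what changed: A repeatedly splices text[i:i+2] in place and rescans from the same index; B makes one forward pass that accumulates a run of conjunction-ending lines and flushes each run as a single ' '.join, never mutating mid-scan.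
import Mathlib
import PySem

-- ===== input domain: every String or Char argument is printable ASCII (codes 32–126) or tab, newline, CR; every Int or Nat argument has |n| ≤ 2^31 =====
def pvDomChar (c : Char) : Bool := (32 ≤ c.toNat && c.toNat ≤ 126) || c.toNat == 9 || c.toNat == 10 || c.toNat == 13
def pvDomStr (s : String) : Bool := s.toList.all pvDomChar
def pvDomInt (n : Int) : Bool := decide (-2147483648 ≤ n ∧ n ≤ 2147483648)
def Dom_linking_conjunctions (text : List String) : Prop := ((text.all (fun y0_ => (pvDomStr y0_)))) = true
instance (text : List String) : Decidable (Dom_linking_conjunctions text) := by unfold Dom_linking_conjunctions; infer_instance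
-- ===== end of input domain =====

-- B replaces A's in-place splice-and-rescan while loop with a single forward pass that
-- accumulates a run of conjunction-ending lines and flushes it as one joined string
-- (objective: simpler).  Both Pythons mutate `text` in place and return it; the equivalence
-- proved here is about the returned value (B performs the same net mutation via text[:] = result).

-- ===== PORT A =====
-- conjunctions = ('of','for','from','and',',')  ;  text[i].endswith(conjunctions)
def conjsA : List String := ["of", "for", "from", "and", ","]

def endsConjA (s : String) : Bool := conjsA.any (fun c => PySem.Str.endswith s c)

-- the while loop: text[i:i+2] = [reduce(lambda i,j: i+' '+j, text[i:i+2])].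
-- python sets i,n = i-1,n-1 and then i = i+1, i.e. it continues with the SAME i and n-1.
def loopA (text : List String) (i n : Nat) : List String :=
  if _h : i + 1 < n then
    if endsConjA (text.getD i "") then
      loopA (text.take i ++ [text.getD i "" ++ " " ++ text.getD (i + 1) ""] ++ text.drop (i + 2))
        i (n - 1)
    else
      loopA text (i + 1) n
  else text
termination_by 2 * n - i
decreasing_by all_goals omega

def linking_conjunctions (text : List String) : List String :=
  loopA text 0 text.length

-- ===== PORT B =====
def conjsB : List String := ["of", "for", "from", "and", ","]

def endsConjB (line : String) : Bool := conjsB.any (fun c => PySem.Str.endswith line c)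

-- loop body: group.append(line); if not line.endswith(conjunctions): result.append(' '.join(group)); group = []
def stepB (st : List String × List String) (line : String) : List String × List String :=
  let group := st.2 ++ [line]
  if !endsConjB line then (st.1 ++ [PySem.Str.join " " group], [])
  else (st.1, group)

def linking_conjunctions_alt (text : List String) : List String :=
  let st := text.foldl stepB ([], [])
  if st.2 ≠ [] then st.1 ++ [PySem.Str.join " " st.2] else st.1

-- ===== PRECONDITION & SPEC =====
def Spec_linking_conjunctions (text : List String) (out : List String) : Prop := out = linking_conjunctions_alt text
instance (text : List String) (out : List String) : Decidable (Spec_linking_conjunctions text out) := by unfold Spec_linking_conjunctions; infer_instance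

-- ===== CLAIM (what is proved, stated in full; the proofs are below) =====
def Claim_equal_linking_conjunctions : Prop := ∀ (text : List String), Dom_linking_conjunctions text → Spec_linking_conjunctions text (linking_conjunctions text)

-- ===== LEMMAS AND PROOFS =====

-- canonical recursive grouping both ports are reduced to
def grp : List String → List String
  | [] => []
  | [x] => [x]
  | x :: y :: r => if endsConjA x then grp ((x ++ " " ++ y) :: r) else x :: grp (y :: r)
termination_by l => l.length

-- a suffix that avoids the separator character passes through "a ++ m :: b"
lemma suffix_through (m : Char) (cl al bl : List Char) (hm : m ∉ cl) :
    cl <:+ (al ++ m :: bl) ↔ cl <:+ bl := by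
  constructor
  · rintro ⟨t, ht⟩
    have hlt : t.length + cl.length = al.length + 1 + bl.length := by
      have := congrArg List.length ht; simp at this; omega
    by_cases hlen : cl.length ≤ bl.length
    · have h1 : cl = (al ++ m :: bl).drop t.length := by rw [← ht]; simp
      rw [List.drop_append] at h1
      rw [List.drop_eq_nil_of_le (by omega : al.length ≤ t.length)] at h1
      rw [show t.length - al.length = (t.length - al.length - 1) + 1 by omega,
        List.drop_succ_cons] at h1
      simp at h1
      exact h1 ▸ List.drop_suffix _ _
    · exfalso
      apply hm
      have h1 := congrArg (List.drop al.length) ht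
      rw [List.drop_append, List.drop_append] at h1
      rw [List.drop_eq_nil_of_le (by omega : t.length ≤ al.length)] at h1
      simp at h1
      have hmem : m ∈ cl.drop (al.length - t.length) := by rw [h1]; exact List.mem_cons_self ..
      exact List.drop_subset _ _ hmem
  · intro h
    exact h.trans ((List.suffix_cons m bl).trans (List.suffix_append _ _))

lemma endsConjA_through (a b : String) : endsConjA (a ++ " " ++ b) = endsConjA b := by
  have key : ∀ c : String, (' ' : Char) ∉ c.toList →
      PySem.Str.endswith (a ++ " " ++ b) c = PySem.Str.endswith b c := by
    intro c hc
    simp only [PySem.Str.endswith_eq]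
    apply Bool.eq_iff_iff.mpr
    rw [PySem.Chars.endswith_iff, PySem.Chars.endswith_iff]
    rw [show (a ++ " " ++ b).toList = a.toList ++ ' ' :: b.toList by simp]
    exact suffix_through ' ' _ _ _ hc
  unfold endsConjA conjsA
  simp only [List.any_cons, List.any_nil]
  rw [key "of" (by decide), key "for" (by decide), key "from" (by decide),
    key "and" (by decide), key "," (by decide)]

-- ' '.join on a singleton, a cons and a snoc
lemma chars_join_snoc (sep : List Char) :
    ∀ (g : List (List Char)) (x : List Char), g ≠ [] →
      PySem.Chars.join sep (g ++ [x]) = PySem.Chars.join sep g ++ sep ++ x := by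
  intro g
  induction g with
  | nil => intro x hg; exact absurd rfl hg
  | cons a g ih =>
    intro x _
    cases g with
    | nil =>
      simp only [List.cons_append, List.nil_append]
      rw [PySem.Chars.join_cons_cons, PySem.Chars.join_singleton, PySem.Chars.join_singleton]
    | cons b g' =>
      simp only [List.cons_append]
      rw [PySem.Chars.join_cons_cons]
      have ih' := ih x (by simp)
      simp only [List.cons_append] at ih'
      rw [ih', PySem.Chars.join_cons_cons]
      simp [List.append_assoc]

lemma join_singleton (x : String) : PySem.Str.join " " [x] = x := by
  apply String.toList_injective
  rw [PySem.Str.toList_join, List.map_cons, List.map_nil, PySem.Chars.join_singleton]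

lemma join_cons (a : String) (g : List String) (hg : g ≠ []) :
    PySem.Str.join " " (a :: g) = a ++ " " ++ PySem.Str.join " " g := by
  apply String.toList_injective
  cases g with
  | nil => exact absurd rfl hg
  | cons b g' =>
    simp only [PySem.Str.toList_join, List.map_cons, PySem.Chars.join_cons_cons]
    simp [PySem.Str.toList_join]

lemma join_snoc (g : List String) (x : String) (hg : g ≠ []) :
    PySem.Str.join " " (g ++ [x]) = PySem.Str.join " " g ++ " " ++ x := by
  apply String.toList_injective
  simp only [PySem.Str.toList_join, List.map_append, List.map_cons, List.map_nil]
  rw [chars_join_snoc _ _ _ (by simpa using hg)]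
  simp [PySem.Str.toList_join]

lemma endsConjA_join (g : List String) (hg : g ≠ []) (hall : ∀ x ∈ g, endsConjA x = true) :
    endsConjA (PySem.Str.join " " g) = true := by
  induction g with
  | nil => exact absurd rfl hg
  | cons a g ih =>
    cases g with
    | nil => rw [join_singleton]; exact hall a (by simp)
    | cons b g' =>
      rw [join_cons a (b :: g') (by simp), endsConjA_through]
      exact ih (by simp) (fun x hx => hall x (by simp at hx ⊢; tauto))

lemma endsConjB_eq (s : String) : endsConjB s = endsConjA s := rfl

-- ===== A's loop computes grp =====
lemma loopA_eq (m : Nat) : ∀ (text : List String) (i : Nat), 2 * text.length - i ≤ m →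
    loopA text i text.length = text.take i ++ grp (text.drop i) := by
  induction m with
  | zero =>
    intro text i hm
    rw [loopA]
    split
    · omega
    · -- drop i has at most one element
      rename_i h
      have : text.length ≤ i := by omega
      have hd : text.drop i = [] := List.drop_eq_nil_of_le this
      simp [hd, grp, List.take_of_length_le this]
  | succ m ih =>
    intro text i hm
    rw [loopA]
    split
    · rename_i h
      have hi : i < text.length := by omega
      have hi1 : i + 1 < text.length := h
      have hgi : text.getD i "" = text[i] := List.getD_eq_getElem text "" hi
      have hgi1 : text.getD (i + 1) "" = text[i + 1] := List.getD_eq_getElem text "" hi1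
      have hdropi : text.drop i = text[i] :: text[i + 1] :: text.drop (i + 2) := by
        rw [List.drop_eq_getElem_cons hi, List.drop_eq_getElem_cons hi1]
      split
      · rename_i hc
        set t' := text.take i ++ [text.getD i "" ++ " " ++ text.getD (i + 1) ""] ++ text.drop (i + 2) with ht'
        have hlen' : t'.length = text.length - 1 := by
          simp [ht', List.length_take, List.length_drop]
          omega
        have htake : t'.take i = text.take i := by
          simp only [ht', List.append_assoc, List.take_append, List.length_take]
          have h1 : min i text.length = i := by omega
          simp [h1, List.take_take]
        have hdrop' : t'.drop i = (text.getD i "" ++ " " ++ text.getD (i + 1) "") :: text.drop (i + 2) := by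
          simp only [ht', List.append_assoc, List.drop_append, List.length_take]
          have h1 : min i text.length = i := by omega
          simp [h1]
        rw [show text.length - 1 = t'.length by omega]
        rw [ih t' i (by omega)]
        rw [htake, hdrop', hdropi]
        have hc' : endsConjA text[i] = true := hgi ▸ hc
        conv_rhs => rw [grp]
        rw [if_pos hc', hgi, hgi1]
      · rename_i hc
        rw [ih text (i + 1) (by omega)]
        have htake1 : text.take (i + 1) = text.take i ++ [text[i]] := by
          rw [List.take_add_one]
          simp [List.getElem?_eq_getElem hi]
        have hdropi1 : text.drop (i + 1) = text[i + 1] :: text.drop (i + 2) := by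
          rw [List.drop_eq_getElem_cons hi1]
        rw [hgi] at hc
        simp only [Bool.not_eq_true] at hc
        conv_rhs => rw [hdropi, grp]
        rw [if_neg (by simp [hc]), ← hdropi1, htake1, List.append_assoc]
        rfl
    · rename_i h
      cases hd : text.drop i with
      | nil =>
        have hlen0 : text.length - i = 0 := by simpa using congrArg List.length hd
        simp [grp, List.take_of_length_le (by omega : text.length ≤ i)]
      | cons x r =>
        cases r with
        | nil =>
          have hlt : text.length = i + 1 := by
            have := congrArg List.length hd; simp at this; omega
          rw [grp]
          conv_lhs => rw [← List.take_append_drop i text]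
          rw [hd]
        | cons y r' =>
          exfalso
          have := congrArg List.length hd
          simp at this; omega

-- ===== B's fold computes grp =====
-- grouping with a pending (nonempty-or-empty) accumulator, mirroring B's state
def grp2 : List String → List String → List String
  | g, [] => if g ≠ [] then [PySem.Str.join " " g] else []
  | g, x :: r => if endsConjB x then grp2 (g ++ [x]) r
                 else PySem.Str.join " " (g ++ [x]) :: grp2 [] r

lemma foldB_eq : ∀ (rest res g : List String),
    (let st := rest.foldl stepB (res, g);
     if st.2 ≠ [] then st.1 ++ [PySem.Str.join " " st.2] else st.1) = res ++ grp2 g rest := by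
  intro rest
  induction rest with
  | nil =>
    intro res g
    by_cases hg : g = [] <;> simp [grp2, hg]
  | cons x r ih =>
    intro res g
    simp only [List.foldl_cons]
    rw [grp2]
    by_cases hx : endsConjB x
    · simpa [stepB, hx] using ih res (g ++ [x])
    · simp only [stepB, hx, Bool.not_false, if_true]
      have ih' := ih (res ++ [PySem.Str.join " " (g ++ [x])]) []
      simp only at ih'
      rw [ih']
      simp [List.append_assoc]

lemma grp2_eq (n : Nat) : ∀ (rest : List String), rest.length ≤ n →
    (∀ g, g ≠ [] → (∀ x ∈ g, endsConjA x = true) →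
        grp2 g rest = grp (PySem.Str.join " " g :: rest)) ∧ grp2 [] rest = grp rest := by
  induction n with
  | zero =>
    intro rest hr
    have : rest = [] := List.eq_nil_of_length_eq_zero (by omega)
    subst this
    exact ⟨fun g hg _ => by simp [grp2, grp, hg], by simp [grp2, grp]⟩
  | succ n ih =>
    intro rest hr
    cases rest with
    | nil => exact ⟨fun g hg _ => by simp [grp2, grp, hg], by simp [grp2, grp]⟩
    | cons x r =>
      have hrn : r.length ≤ n := by simp at hr; omega
      constructor
      · intro g hg hall
        rw [grp2, grp]
        rw [if_pos (endsConjA_join g hg hall)]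
        rw [← join_snoc g x hg]
        by_cases hx : endsConjB x
        · rw [if_pos hx]
          exact (ih r hrn).1 (g ++ [x]) (by simp)
            (fun y hy => by
              rcases List.mem_append.mp hy with h | h
              · exact hall y h
              · simp at h; subst h; rwa [endsConjB_eq] at hx)
        · rw [if_neg hx]
          rw [(ih r hrn).2]
          cases r with
          | nil => simp [grp]
          | cons y r' =>
            rw [grp]
            rw [join_snoc g x hg, endsConjA_through]
            rw [endsConjB_eq] at hx
            simp only [Bool.not_eq_true] at hx
            simp [hx]
      · rw [grp2]
        by_cases hx : endsConjB x
        · rw [if_pos hx]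
          have := (ih r hrn).1 [x] (by simp)
            (fun y hy => by simp at hy; subst hy; rwa [endsConjB_eq] at hx)
          rwa [join_singleton] at this
        · rw [if_neg hx]
          rw [(ih r hrn).2]
          rw [show ([] : List String) ++ [x] = [x] by simp, join_singleton]
          cases r with
          | nil => simp [grp]
          | cons y r' =>
            rw [grp]
            rw [endsConjB_eq] at hx
            simp only [Bool.not_eq_true] at hx
            simp [hx]

-- ===== VERDICT (by name: the statement is the Claim_ definition above) =====
theorem linking_conjunctions_spec : Claim_equal_linking_conjunctions := by
  intro text _
  unfold Spec_linking_conjunctions linking_conjunctions linking_conjunctions_alt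
  rw [loopA_eq (2 * text.length) text 0 (by omega)]
  have hb := foldB_eq text [] []
  simp only at hb
  rw [hb]
  simp [(grp2_eq text.length text (le_refl _)).2]
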